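-- pv_equiv track=rewrite | github.com/miohtama/vvv | vvv/utils.py | snip_output
-- ===== SOURCE A (Python) =====
-- def snip_output(output, marker):
--     """
--     Remove tailing lines of the output after encountering certain marker string in the output.
--
--     :param output: Command output as a string
--
--     :param marker: Marker string after which all lines can be dropped
--     """
--     passed = []
--     filtering = False
--     for line in output.split("\n"):
--
--         if marker in line:
--             filtering = True
--
--         if not filtering:
--             passed.append(line)
--
--
--     return "\n".join(passed)
-- ===== SOURCE B (Python) =====
-- def snip_output(output, marker):
--     """
--     Remove tailing lines of the output after encountering certain marker string in the output.
--
--     :param output: Command output as a string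
--
--     :param marker: Marker string after which all lines can be dropped
--     """
--     lines = output.split("\n")
--     i = next((i for i, line in enumerate(lines) if marker in line), len(lines))
--     return "\n".join(lines[:i])
-- ===== Notes on version B (the rewrite author's own statement) =====
-- stated objective: simpler
-- what changed: Replaces the boolean filtering flag and incremental append loop with locating the index of the first marker line and slicing the line list before it.
import Mathlib
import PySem

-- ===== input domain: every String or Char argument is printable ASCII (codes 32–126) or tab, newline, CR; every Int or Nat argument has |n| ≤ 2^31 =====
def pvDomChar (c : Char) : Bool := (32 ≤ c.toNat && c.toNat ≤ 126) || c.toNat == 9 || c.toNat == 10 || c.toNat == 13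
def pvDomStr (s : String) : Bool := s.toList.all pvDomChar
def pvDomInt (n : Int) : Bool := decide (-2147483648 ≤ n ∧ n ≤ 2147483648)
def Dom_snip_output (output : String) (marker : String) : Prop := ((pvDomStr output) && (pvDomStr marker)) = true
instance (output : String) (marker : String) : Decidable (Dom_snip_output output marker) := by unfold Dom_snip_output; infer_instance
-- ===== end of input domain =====

-- B replaces A's filtering-flag loop by finding the first marker line's index and slicing: simpler decomposition, same cost.

-- ===== PORT A =====
-- one loop iteration of A: state = (passed, filtering)
def snipStepA (marker : String) (st : List String × Bool) (line : String) : List String × Bool :=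
  let filtering := if PySem.Str.isIn marker line then true else st.2
  (if !filtering then st.1 ++ [line] else st.1, filtering)

def snip_output (output : String) (marker : String) : String :=
  -- output.split("\n"): sep = "\n" ≠ "" so split? is always some; getD only totalizes
  let lines := (PySem.Str.split? output "\n").getD []
  let final := lines.foldl (snipStepA marker) ([], false)
  PySem.Str.join "\n" final.1

-- ===== PORT B =====
def snip_output_alt (output : String) (marker : String) : String :=
  let lines := (PySem.Str.split? output "\n").getD []
  -- next((i for i, line in enumerate(lines) if marker in line), len(lines)):
  -- List.findIdx returns lines.length when no line matches, exactly the default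
  let i := lines.findIdx (fun line => PySem.Str.isIn marker line)
  PySem.Str.join "\n" (lines.take i)

-- ===== PRECONDITION & SPEC =====
def Spec_snip_output (output : String) (marker : String) (out : String) : Prop := out = snip_output_alt output marker
instance (output : String) (marker : String) (out : String) : Decidable (Spec_snip_output output marker out) := by unfold Spec_snip_output; infer_instance

-- ===== CLAIM (what is proved, stated in full; the proofs are below) =====
def Claim_equal_snip_output : Prop := ∀ (output : String) (marker : String), Dom_snip_output output marker → Spec_snip_output output marker (snip_output output marker)

-- ===== LEMMAS AND PROOFS =====

theorem snip_foldl_true (marker : String) (ls : List String) (acc : List String) :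
    ls.foldl (snipStepA marker) (acc, true) = (acc, true) := by
  induction ls generalizing acc with
  | nil => rfl
  | cons h t ih => simp [snipStepA, List.foldl]; exact ih acc

theorem snip_foldl_false (marker : String) (ls : List String) (acc : List String) :
    (ls.foldl (snipStepA marker) (acc, false)).1
    = acc ++ ls.take (ls.findIdx (fun line => PySem.Str.isIn marker line)) := by
  induction ls generalizing acc with
  | nil => simp
  | cons h t ih =>
    by_cases hm : PySem.Chars.isIn marker.toList h.toList = true
    · simp [List.foldl, snipStepA, List.findIdx_cons, hm, snip_foldl_true]
    · simp only [Bool.not_eq_true] at hm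
      simp [List.foldl, snipStepA, List.findIdx_cons, hm, ih, List.take_succ_cons]

-- ===== VERDICT (by name: the statement is the Claim_ definition above) =====
theorem snip_output_spec : Claim_equal_snip_output := by
  intro output marker _
  show snip_output output marker = snip_output_alt output marker
  simp only [snip_output, snip_output_alt, snip_foldl_false, List.nil_append]
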